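-- pv_equiv track=rewrite | github.com/Mae1228/python | 2021暑假课/04-较真字符串/格式化字符串-成果包.py | Convert
-- ===== SOURCE A (Python) =====
-- def Convert(text,mode):
--     #text需要转换的字符串
--     #mode表示转换模式，mode=T则全部转换为大写，为F则全部转换为小写
--     newText=''
--     textList=list(text)
--     for i in range(len(text)):
--         ascii=ord(textList[i])
--         #转换为大写
--         if mode:
--             if ascii>=97 and ascii<=122:
--                 newText+=chr(ascii-32)
--             else:
--                 newText+=textList[i]
--         #转换为小写
--         else:
--             if ascii>=65 and ascii<=90:
--                 newText+=chr(ascii+32)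
--             else:
--                 newText+=textList[i]
--     return newText
-- ===== SOURCE B (Python) =====
-- def Convert(text, mode):
--     # Build a translation table of ordinals once, then translate in one call.
--     if mode:
--         table = {o: o - 32 for o in range(97, 123)}
--     else:
--         table = {o: o + 32 for o in range(65, 91)}
--     return text.translate(table)
-- ===== Notes on version B (the rewrite author's own statement) =====
-- stated objective: faster
-- what changed: Replaces the explicit index loop with per-character if/else string concatenation by building an ordinal translation table once and applying str.translate.
import Mathlib
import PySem

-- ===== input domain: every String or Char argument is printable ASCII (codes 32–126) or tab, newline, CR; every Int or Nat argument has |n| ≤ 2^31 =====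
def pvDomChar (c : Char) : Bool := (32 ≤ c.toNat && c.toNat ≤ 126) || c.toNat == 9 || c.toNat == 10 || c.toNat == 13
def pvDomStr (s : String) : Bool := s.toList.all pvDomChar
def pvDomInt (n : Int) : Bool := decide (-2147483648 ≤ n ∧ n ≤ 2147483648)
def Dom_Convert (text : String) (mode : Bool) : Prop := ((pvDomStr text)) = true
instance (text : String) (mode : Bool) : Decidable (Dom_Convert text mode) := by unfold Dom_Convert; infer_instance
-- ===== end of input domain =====

-- B changes the algorithm (ordinal translation table + translate) for idiomatic style; same values.

-- ===== PORT A =====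
-- newText is built character by character; the Lean port accumulates the List Char
-- behind the Python string and wraps it with String.mk at the end (exact for string +=).
def Convert (text : String) (mode : Bool) : String :=
  let textList := text.toList
  String.mk ((PySem.List.pyRange 0 (textList.length : Int) 1).foldl
    (fun newText i =>
      let c := PySem.List.pyGetD textList i ' '
      let ascii : Int := (c.toNat : Int)
      if mode then
        if 97 ≤ ascii ∧ ascii ≤ 122 then newText ++ [Char.ofNat (ascii - 32).toNat]
        else newText ++ [c]
      else
        if 65 ≤ ascii ∧ ascii ≤ 90 then newText ++ [Char.ofNat (ascii + 32).toNat]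
        else newText ++ [c]) [])

-- ===== PORT B =====
-- str.translate with an ordinal dict: unmapped ordinals keep their character (exact).
def Convert_alt (text : String) (mode : Bool) : String :=
  let table : PySem.Dict Int Int :=
    if mode then
      (PySem.List.pyRange 97 123 1).foldl (fun d o => d.insert o (o - 32)) PySem.Dict.empty
    else
      (PySem.List.pyRange 65 91 1).foldl (fun d o => d.insert o (o + 32)) PySem.Dict.empty
  String.mk (text.toList.map (fun c =>
    match table.get? ((c.toNat : Int)) with
    | some v => Char.ofNat v.toNat
    | none => c))

-- ===== PRECONDITION & SPEC =====
def Spec_Convert (text : String) (mode : Bool) (out : String) : Prop := out = Convert_alt text mode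
instance (text : String) (mode : Bool) (out : String) : Decidable (Spec_Convert text mode out) := by unfold Spec_Convert; infer_instance

-- ===== CLAIM (what is proved, stated in full; the proofs are below) =====
def Claim_equal_Convert : Prop := ∀ (text : String) (mode : Bool), Dom_Convert text mode → Spec_Convert text mode (Convert text mode)

-- ===== LEMMAS AND PROOFS =====

-- Lookup in a dict built by inserting (o, f o) for o in range(a, a+n): interval lookup.
theorem get?_foldl_insert_range (f : Int → Int) (x : Int) :
    ∀ (n : Nat) (a : Int) (d : PySem.Dict Int Int),
      ((PySem.List.pyRange a (a + (n : Int)) 1).foldl (fun d o => d.insert o (f o)) d).get? x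
        = if a ≤ x ∧ x < a + (n : Int) then some (f x) else d.get? x := by
  intro n
  induction n with
  | zero =>
    intro a d
    rw [PySem.List.pyRange_one_eq_nil (by omega)]
    simp only [List.foldl_nil]
    rw [if_neg (by omega)]
  | succ n ih =>
    intro a d
    rw [PySem.List.pyRange_one_cons (by push_cast; omega)]
    simp only [List.foldl_cons]
    have hb : a + ((n : Int) + 1) = (a + 1) + (n : Int) := by ring
    push_cast
    rw [hb, ih (a + 1) (d.insert a (f a)), PySem.Dict.get?_insert]
    by_cases hx : x = a
    · subst hx
      rw [if_neg (by omega), if_pos rfl, if_pos (by omega)]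
    · by_cases hr : a ≤ x ∧ x < a + 1 + (n : Int)
      · rw [if_pos (by omega), if_pos (by omega)]
      · rw [if_neg (by omega), if_neg hx, if_neg (by omega)]

theorem tblU_get (x : Int) :
    ((PySem.List.pyRange 97 123 1).foldl (fun d o => d.insert o (o - 32)) PySem.Dict.empty).get? x
      = if 97 ≤ x ∧ x ≤ 122 then some (x - 32) else none := by
  have h := get?_foldl_insert_range (fun o => o - 32) x 26 97 PySem.Dict.empty
  norm_num at h
  rw [h]
  by_cases hx : 97 ≤ x ∧ x ≤ 122
  · rw [if_pos (by omega), if_pos hx]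
  · rw [if_neg (by omega), if_neg hx]

theorem tblL_get (x : Int) :
    ((PySem.List.pyRange 65 91 1).foldl (fun d o => d.insert o (o + 32)) PySem.Dict.empty).get? x
      = if 65 ≤ x ∧ x ≤ 90 then some (x + 32) else none := by
  have h := get?_foldl_insert_range (fun o => o + 32) x 26 65 PySem.Dict.empty
  norm_num at h
  rw [h]
  by_cases hx : 65 ≤ x ∧ x ≤ 90
  · rw [if_pos (by omega), if_pos hx]
  · rw [if_neg (by omega), if_neg hx]

-- The accumulating per-character loop equals mapping the table translation.
theorem loop_eq (mode : Bool) (xs init : List Char) :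
    xs.foldl (fun newText c =>
      if mode = true then
        if 97 ≤ ((c.toNat : Int)) ∧ ((c.toNat : Int)) ≤ 122 then
          newText ++ [Char.ofNat (((c.toNat : Int)) - 32).toNat]
        else newText ++ [c]
      else
        if 65 ≤ ((c.toNat : Int)) ∧ ((c.toNat : Int)) ≤ 90 then
          newText ++ [Char.ofNat (((c.toNat : Int)) + 32).toNat]
        else newText ++ [c]) init
    = init ++ xs.map (fun c =>
        match (if mode = true then
            (PySem.List.pyRange 97 123 1).foldl (fun d o => d.insert o (o - 32)) PySem.Dict.empty
          else
            (PySem.List.pyRange 65 91 1).foldl (fun d o => d.insert o (o + 32)) PySem.Dict.empty).get?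
            ((c.toNat : Int)) with
        | some v => Char.ofNat v.toNat
        | none => c) := by
  induction xs generalizing init with
  | nil => simp
  | cons c cs ih =>
    simp only [List.foldl_cons, List.map_cons]
    rw [ih]
    cases mode <;>
      simp only [Bool.false_eq_true, if_true, if_false, tblU_get, tblL_get] <;>
      split_ifs <;> simp [List.append_assoc]

theorem Convert_eq (text : String) (mode : Bool) : Convert text mode = Convert_alt text mode := by
  simp only [Convert, Convert_alt]
  congr 1
  rw [PySem.List.foldl_pyRange_zero_pyGetD' text.toList ' '
    (fun (newText : List Char) (c : Char) =>
      if mode = true then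
        if 97 ≤ ((c.toNat : Int)) ∧ ((c.toNat : Int)) ≤ 122 then
          newText ++ [Char.ofNat (((c.toNat : Int)) - 32).toNat]
        else newText ++ [c]
      else
        if 65 ≤ ((c.toNat : Int)) ∧ ((c.toNat : Int)) ≤ 90 then
          newText ++ [Char.ofNat (((c.toNat : Int)) + 32).toNat]
        else newText ++ [c]) []]
  rw [loop_eq mode text.toList []]
  simp only [List.nil_append]

-- ===== VERDICT (by name: the statement is the Claim_ definition above) =====
theorem Convert_spec : Claim_equal_Convert := by
  intro text mode _
  unfold Spec_Convert
  exact Convert_eq text mode
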